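-- pv_equiv track=rewrite | github.com/peter-as/advent-of-code | 2025/04.py | find_all_movable
-- ===== SOURCE A (Python) =====
-- def find_movable(t: list[str]) -> list[tuple[int, int]]:
--     """
--     Finds movable boxes (the ones that have less than 8 boxes in their vicinity).
--
--     Args:
--         t: The table as a list of strings.
--
--     Returns:
--         The indices of the boxes that are movable.
--     """
--     movable = []
--     for i in range (1, len(t) - 1):
--         for j in range(1, len(t[i]) - 1):
--             if t[i][j] == "@":
--                 neighbours = (
--                     t[i - 1][j - 1], t[i - 1][j], t[i - 1][j + 1],
--                     t[i][j - 1],                     t[i][j + 1],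
--                     t[i + 1][j - 1], t[i + 1][j], t[i + 1][j + 1])
--                 boxes = 0
--                 for n in neighbours:
--                     if n == "@":
--                         boxes += 1
--                 if boxes < 4:
--                     movable.append((i, j))
--     return movable
--
-- def find_all_movable(t: list[str]) -> int:
--     """
--     Finds and removes all the movable boxes.
--
--     Args:
--         t: The table as a list of strings.
--
--     Returns:
--         The number of boxes that were movable/
--     """
--     total = 0
--     movable = find_movable(t)
--     while len(movable) > 0:
--         total += len(movable)
--         for i, j in movable:
--             t[i] = t[i][:j] + "." + t[i][j + 1:]
--         movable = find_movable(t)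
--     return total
-- ===== SOURCE B (Python) =====
-- def find_all_movable(t: list[str]) -> int:
--     """Counts all boxes removable by iterated peeling (interior '@' cells with
--     fewer than 4 '@' neighbours), via a worklist that only re-examines cells
--     whose neighbourhood changed, instead of rescanning the whole table each
--     round.  Reads t without mutating it."""
--     H = len(t)
--     removed = set()
--     stack = [(i, j)
--              for i in range(1, H - 1)
--              for j in range(1, len(t[i]) - 1)
--              if t[i][j] == "@"]
--
--     def live(i, j):
--         return (0 <= i < H and 0 <= j < len(t[i])
--                 and t[i][j] == "@" and (i, j) not in removed)
--
--     while stack: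
--         i, j = stack.pop()
--         if ((i, j) in removed
--                 or not (1 <= i < H - 1 and 1 <= j < len(t[i]) - 1)
--                 or t[i][j] != "@"):
--             continue
--         deg = sum(live(i + di, j + dj)
--                   for di in (-1, 0, 1) for dj in (-1, 0, 1)
--                   if (di, dj) != (0, 0))
--         if deg < 4:
--             removed.add((i, j))
--             for di in (-1, 0, 1):
--                 for dj in (-1, 0, 1):
--                     if (di, dj) != (0, 0):
--                         stack.append((i + di, j + dj))
--     return len(removed)
-- ===== Notes on version B (the rewrite author's own statement) =====
-- stated objective: alternative
-- what changed: A rescans the whole table every round and rebuilds rows by string slicing until no box is removable; B does a single worklist peeling over a set of removed coordinates, re-examining only cells whose neighbourhood changed (on the sampled sparse inputs both run in one pass, so no speed-up was measured).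
import Mathlib
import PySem

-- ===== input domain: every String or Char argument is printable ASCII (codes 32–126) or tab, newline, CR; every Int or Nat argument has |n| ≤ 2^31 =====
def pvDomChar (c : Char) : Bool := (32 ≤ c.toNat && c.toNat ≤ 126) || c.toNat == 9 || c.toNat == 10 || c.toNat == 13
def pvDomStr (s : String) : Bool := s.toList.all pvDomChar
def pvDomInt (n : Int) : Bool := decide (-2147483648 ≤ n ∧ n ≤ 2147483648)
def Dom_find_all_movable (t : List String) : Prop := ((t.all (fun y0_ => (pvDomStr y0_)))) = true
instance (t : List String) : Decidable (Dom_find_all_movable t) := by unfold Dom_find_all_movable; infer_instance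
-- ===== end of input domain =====

-- B replaces A's rescan-the-whole-table-each-round fixpoint loop by a worklist peeling
-- that re-examines only cells whose neighbourhood changed.  NOTE: Python A mutates its
-- argument t in place (rows are rewritten); B reads t without mutating it — the
-- equivalence proved here is about the RETURN value only.

-- ===== PORT A =====

-- t[i][j] : the char, or '\x00' exactly where Python raises IndexError (those inputs are outside Pre_).
-- Only used with 0 ≤ i < len(t), so the row lookup itself never defaults.
def pvCellA (t : List String) (i j : Int) : Char :=
  (PySem.Str.pyGet? (PySem.List.pyGetD t i "") j).getD '\x00'

def find_movable (t : List String) : List (Int × Int) :=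
  (PySem.List.pyRange 1 ((t.length : Int) - 1) 1).foldl (fun movable i =>
    (PySem.List.pyRange 1 (PySem.Str.len (PySem.List.pyGetD t i "") - 1) 1).foldl (fun movable j =>
      if pvCellA t i j = '@' then
        let neighbours : List Char :=
          [pvCellA t (i-1) (j-1), pvCellA t (i-1) j, pvCellA t (i-1) (j+1),
           pvCellA t i (j-1),                        pvCellA t i (j+1),
           pvCellA t (i+1) (j-1), pvCellA t (i+1) j, pvCellA t (i+1) (j+1)]
        let boxes : Int := neighbours.foldl (fun boxes n => if n = '@' then boxes + 1 else boxes) 0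
        if boxes < 4 then movable ++ [(i, j)] else movable
      else movable) movable) []

-- t[i] = t[i][:j] + "." + t[i][j+1:]
def pvPatchRow (t : List String) (p : Int × Int) : List String :=
  PySem.List.pySetD t p.1
    (PySem.Str.join "" [PySem.Str.slice (PySem.List.pyGetD t p.1 "") none (some p.2), ".",
                        PySem.Str.slice (PySem.List.pyGetD t p.1 "") (some (p.2 + 1)) none])

-- totality guard for the while-loop: every round removes at least one '@', so the
-- number of '@' characters bounds the number of rounds; the 0-fuel branch is unreachable.
def pvAtCount (t : List String) : Nat := (t.map (fun r => r.toList.countP (· == '@'))).sum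

def pvLoopA : Nat → List String → Int → Int
  | 0, _, total => total
  | fuel+1, t, total =>
    let movable := find_movable t
    if movable.length > 0 then
      pvLoopA fuel (movable.foldl pvPatchRow t) (total + movable.length)
    else total

def find_all_movable (t : List String) : Int := pvLoopA (pvAtCount t + 1) t 0

-- ===== PORT B =====

-- [(i, j) for i in range(1, H-1) for j in range(1, len(t[i])-1) if t[i][j] == "@"]
-- (the indices are in range here, so the .getD defaults never fire)
def pvCandList (t : List String) : List (Int × Int) :=
  (PySem.List.pyRange 1 ((t.length : Int) - 1) 1).foldl (fun acc i =>
    (PySem.List.pyRange 1 (PySem.Str.len (PySem.List.pyGetD t i "") - 1) 1).foldl (fun acc j =>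
      if (PySem.Str.pyGet? (PySem.List.pyGetD t i "") j).getD '\x00' = '@' then acc ++ [(i, j)]
      else acc) acc) []

-- the (di, dj) pairs of Source B's generator, in its order
def pvOffsets : List (Int × Int) :=
  [(-1,-1), (-1,0), (-1,1), (0,-1), (0,1), (1,-1), (1,0), (1,1)]

def pvLiveB (t : List String) (removed : PySem.Set (Int × Int)) (i j : Int) : Bool :=
  decide (0 ≤ i) && decide (i < (t.length : Int)) && decide (0 ≤ j) &&
  decide (j < PySem.Str.len (PySem.List.pyGetD t i "")) &&
  ((PySem.Str.pyGet? (PySem.List.pyGetD t i "") j).getD '\x00' == '@') &&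
  !(PySem.Set.contains removed (i, j))

-- Python's list-as-stack (append/pop at the right end) is kept head-first here:
-- cons = push, head = pop — the pop order is identical.  The fuel is a totality
-- guard only: every step pops one entry and pushes 8 only when a cell is removed,
-- and at most |candidates| cells are ever removed, so the fuel below never runs out.
def pvLoopB (t : List String) : Nat → PySem.Set (Int × Int) → List (Int × Int) → Int
  | 0, removed, _ => PySem.Set.len removed
  | _+1, removed, [] => PySem.Set.len removed
  | fuel+1, removed, (i, j) :: stack =>
    if PySem.Set.contains removed (i, j)
       || !(decide (1 ≤ i) && decide (i < (t.length : Int) - 1) && decide (1 ≤ j) &&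
            decide (j < PySem.Str.len (PySem.List.pyGetD t i "") - 1))
       || !((PySem.Str.pyGet? (PySem.List.pyGetD t i "") j).getD '\x00' == '@') then
      pvLoopB t fuel removed stack
    else
      let deg : Int := pvOffsets.foldl
        (fun acc d => acc + (if pvLiveB t removed (i + d.1) (j + d.2) then 1 else 0)) 0
      if deg < 4 then
        pvLoopB t fuel (PySem.Set.add removed (i, j))
          ((pvOffsets.map (fun d => (i + d.1, j + d.2))).reverse ++ stack)
      else
        pvLoopB t fuel removed stack

def find_all_movable_alt (t : List String) : Int :=
  let stack := pvCandList t
  pvLoopB t (10 * stack.length + 1) PySem.Set.empty stack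

-- ===== PRECONDITION & SPEC =====

-- Pre_ excludes exactly the inputs where Python A raises IndexError: an interior '@'
-- whose neighbouring row above or below is too short to hold all 8 neighbour reads.
def Pre_find_all_movable (t : List String) : Prop :=
  ∀ i, i < t.length → ∀ j, j < (t.getD i "").toList.length →
    (1 ≤ i ∧ i + 1 < t.length ∧ 1 ≤ j ∧ j + 1 < (t.getD i "").toList.length ∧
     (t.getD i "").toList.getD j ' ' = '@') →
      j + 2 ≤ (t.getD (i-1) "").toList.length ∧ j + 2 ≤ (t.getD (i+1) "").toList.length
instance (t : List String) : Decidable (Pre_find_all_movable t) := by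
  unfold Pre_find_all_movable; infer_instance

def pvWitness_find_all_movable : List String := ["@@@", "@@.", "..."]

def Spec_find_all_movable (t : List String) (out : Int) : Prop := out = find_all_movable_alt t
instance (t : List String) (out : Int) : Decidable (Spec_find_all_movable t out) := by
  unfold Spec_find_all_movable; infer_instance

-- ===== CLAIM (what is proved, stated in full; the proofs are below) =====
def Claim_equal_find_all_movable : Prop :=
  ∀ (t : List String), Dom_find_all_movable t → Pre_find_all_movable t →
    Spec_find_all_movable t (find_all_movable t)

-- ===== LEMMAS AND PROOFS =====

/- ===== Abstract model: the original table `t`, a list `R` of already-removed cells,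
   and the "peeling" process both programs perform. ===== -/

-- row i of the table, [] when out of range
def mRow (t : List String) (i : Int) : List Char :=
  if 0 ≤ i ∧ i < (t.length : Int) then (t.getD i.toNat "").toList else []

-- cell (i, j) of the ORIGINAL table holds a box
def mAt (t : List String) (i j : Int) : Bool :=
  decide (0 ≤ j) && ((mRow t i).getD j.toNat '\x00' == '@')

-- the cell still holds a box once the cells in R have been cleared
def mLive (t : List String) (R : List (Int × Int)) (i j : Int) : Bool :=
  mAt t i j && !(R.contains (i, j))

-- number of live neighbour boxes
def mDeg (t : List String) (R : List (Int × Int)) (i j : Int) : Nat :=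
  pvOffsets.countP (fun d => mLive t R (i + d.1) (j + d.2))

-- a removable candidate: an interior box of the original table
def mCand (t : List String) (p : Int × Int) : Prop :=
  1 ≤ p.1 ∧ p.1 < (t.length : Int) - 1 ∧ 1 ≤ p.2 ∧ p.2 < ((mRow t p.1).length : Int) - 1 ∧
  mAt t p.1 p.2 = true

-- L is a legal removal sequence starting from removed-set R
def mPeel (t : List String) : List (Int × Int) → List (Int × Int) → Prop
  | _, [] => True
  | R, p :: L => mCand t p ∧ p ∉ R ∧ mDeg t R p.1 p.2 < 4 ∧ mPeel t (R ++ [p]) L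

-- no removable cell is left
def mClosed (t : List String) (R : List (Int × Int)) : Prop :=
  ∀ p : Int × Int, mCand t p → p ∉ R → 4 ≤ mDeg t R p.1 p.2

-- all candidates, in scan order
def mCands (t : List String) : List (Int × Int) :=
  (PySem.List.pyRange 1 ((t.length : Int) - 1) 1).flatMap (fun i =>
    ((PySem.List.pyRange 1 (((mRow t i).length : Int) - 1) 1).filter
      (fun j => mAt t i j)).map (fun j => (i, j)))

-- the cells one simultaneous round removes, in scan order
def mMov (t : List String) (R : List (Int × Int)) : List (Int × Int) :=
  (PySem.List.pyRange 1 ((t.length : Int) - 1) 1).flatMap (fun i =>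
    ((PySem.List.pyRange 1 (((mRow t i).length : Int) - 1) 1).filter
      (fun j => mLive t R i j && decide (mDeg t R i j < 4))).map (fun j => (i, j)))

-- A's mutated table s renders the original t with the cells of R cleared
def RelA (t : List String) (R : List (Int × Int)) (s : List String) : Prop :=
  s.length = t.length ∧
  ∀ i : Int, (mRow s i).length = (mRow t i).length ∧
    ∀ j : Int, 0 ≤ j → j < ((mRow t i).length : Int) →
      (mRow s i).getD j.toNat '\x00' =
        (if R.contains (i, j) then '.' else (mRow t i).getD j.toNat '\x00')

/- ===== generic facts about the model ===== -/

theorem mem_nbrs_iff (p q : Int × Int) :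
    p ∈ pvOffsets.map (fun d => (q.1 + d.1, q.2 + d.2)) ↔
      p ≠ q ∧ q.1 - 1 ≤ p.1 ∧ p.1 ≤ q.1 + 1 ∧ q.2 - 1 ≤ p.2 ∧ p.2 ≤ q.2 + 1 := by
  obtain ⟨a, b⟩ := p; obtain ⟨c, d⟩ := q
  simp [pvOffsets, Prod.ext_iff]
  omega

theorem nbrs_symm (p q : Int × Int) :
    p ∈ pvOffsets.map (fun d => (q.1 + d.1, q.2 + d.2)) ↔
      q ∈ pvOffsets.map (fun d => (p.1 + d.1, p.2 + d.2)) := by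
  rw [mem_nbrs_iff, mem_nbrs_iff]
  obtain ⟨a, b⟩ := p; obtain ⟨c, d⟩ := q
  simp [Prod.ext_iff]
  omega

theorem mLive_mono (t : List String) {R R' : List (Int × Int)} (h : ∀ x ∈ R, x ∈ R')
    (i j : Int) : mLive t R' i j = true → mLive t R i j = true := by
  simp only [mLive, Bool.and_eq_true, Bool.not_eq_true', ← Bool.not_eq_true]
  rintro ⟨h1, h2⟩
  refine ⟨h1, fun hc => h2 ?_⟩
  rw [List.contains_iff_mem] at hc ⊢
  exact h _ hc

theorem mDeg_antitone (t : List String) {R R' : List (Int × Int)} (h : ∀ x ∈ R, x ∈ R')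
    (i j : Int) : mDeg t R' i j ≤ mDeg t R i j := by
  exact List.countP_mono_left (fun d _ hd => mLive_mono t h _ _ hd)

theorem mLive_append_singleton (t : List String) (R : List (Int × Int)) (q : Int × Int)
    (i j : Int) (hne : (i, j) ≠ q) : mLive t (R ++ [q]) i j = mLive t R i j := by
  simp [mLive, hne]

theorem mDeg_append_singleton (t : List String) (R : List (Int × Int)) (q : Int × Int)
    (i j : Int) (hq : q ∉ pvOffsets.map (fun d => (i + d.1, j + d.2))) :
    mDeg t (R ++ [q]) i j = mDeg t R i j := by
  unfold mDeg
  refine List.countP_congr (fun d hd => ?_)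
  have hne : (i + d.1, j + d.2) ≠ q := by
    intro he
    exact hq (he ▸ List.mem_map_of_mem hd)
  rw [mLive_append_singleton t R q _ _ hne]

theorem mPeel_sub (t : List String) (S : List (Int × Int)) (hS : mClosed t S) :
    ∀ (L R : List (Int × Int)), mPeel t R L → (∀ x ∈ R, x ∈ S) → ∀ p ∈ L, p ∈ S := by
  intro L
  induction L with
  | nil => intro R _ _ p hp; simp at hp
  | cons p L ih =>
    intro R hpeel hRS q hq
    obtain ⟨hc, hnm, hdeg, htail⟩ := hpeel
    have hpS : p ∈ S := by
      by_contra hpns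
      have h4 := hS p hc hpns
      have hle := mDeg_antitone t hRS p.1 p.2
      omega
    rcases List.mem_cons.1 hq with rfl | hq'
    · exact hpS
    · refine ih (R ++ [p]) htail ?_ q hq'
      intro x hx
      rcases List.mem_append.1 hx with hx | hx
      · exact hRS x hx
      · simp at hx; exact hx ▸ hpS

theorem mPeel_props (t : List String) :
    ∀ (L R : List (Int × Int)), mPeel t R L →
      L.Nodup ∧ (∀ p ∈ L, mCand t p ∧ p ∉ R) := by
  intro L
  induction L with
  | nil => intro R _; simp
  | cons p L ih =>
    intro R hpeel
    obtain ⟨hc, hnm, _, htail⟩ := hpeel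
    obtain ⟨hnd, hmem⟩ := ih (R ++ [p]) htail
    refine ⟨List.nodup_cons.2 ⟨fun hp => ?_, hnd⟩, ?_⟩
    · have := (hmem p hp).2; simp at this
    · intro q hq
      rcases List.mem_cons.1 hq with rfl | hq'
      · exact ⟨hc, hnm⟩
      · obtain ⟨hqc, hqn⟩ := hmem q hq'
        exact ⟨hqc, fun hqR => hqn (List.mem_append_left _ hqR)⟩

theorem mPeel_append (t : List String) :
    ∀ (L₁ L₂ R : List (Int × Int)), mPeel t R L₁ → mPeel t (R ++ L₁) L₂ →
      mPeel t R (L₁ ++ L₂) := by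
  intro L₁
  induction L₁ with
  | nil => intro L₂ R _ h2; simpa using h2
  | cons p L ih =>
    intro L₂ R h1 h2
    obtain ⟨hc, hnm, hdeg, htail⟩ := h1
    refine ⟨hc, hnm, hdeg, ?_⟩
    exact ih L₂ (R ++ [p]) htail (by simpa [List.append_assoc] using h2)

theorem mPeel_of_forall (t : List String) :
    ∀ (L R : List (Int × Int)), L.Nodup →
      (∀ p ∈ L, mCand t p ∧ p ∉ R ∧ mDeg t R p.1 p.2 < 4) → mPeel t R L := by
  intro L
  induction L with
  | nil => intro R _ _; trivial
  | cons p L ih =>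
    intro R hnd hall
    obtain ⟨hc, hnm, hdeg⟩ := hall p (List.mem_cons_self ..)
    refine ⟨hc, hnm, hdeg, ?_⟩
    refine ih (R ++ [p]) (List.nodup_cons.1 hnd).2 (fun q hq => ?_)
    obtain ⟨hqc, hqn, hqd⟩ := hall q (List.mem_cons_of_mem _ hq)
    have hqp : q ≠ p := fun he => (List.nodup_cons.1 hnd).1 (he ▸ hq)
    have hnotin : q ∉ R ++ [p] := by
      simp [hqp]
      exact fun h => hqn h
    refine ⟨hqc, hnotin, lt_of_le_of_lt (mDeg_antitone t ?_ q.1 q.2) hqd⟩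
    exact fun x hx => List.mem_append_left _ hx

theorem mPeel_snoc (t : List String) (R L : List (Int × Int)) (p : Int × Int)
    (h : mPeel t R L) (hc : mCand t p) (hnm : p ∉ R ++ L)
    (hd : mDeg t (R ++ L) p.1 p.2 < 4) : mPeel t R (L ++ [p]) := by
  exact mPeel_append t L [p] R h ⟨hc, hnm, hd, trivial⟩

-- two maximal peelings remove the same set of cells
theorem mPeel_confluent (t : List String) (L₁ L₂ : List (Int × Int))
    (h₁ : mPeel t [] L₁) (c₁ : mClosed t L₁) (h₂ : mPeel t [] L₂) (c₂ : mClosed t L₂) :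
    L₁.length = L₂.length := by
  have n₁ := (mPeel_props t L₁ [] h₁).1
  have n₂ := (mPeel_props t L₂ [] h₂).1
  have s₁ : ∀ p ∈ L₁, p ∈ L₂ := mPeel_sub t L₂ c₂ L₁ [] h₁ (by simp)
  have s₂ : ∀ p ∈ L₂, p ∈ L₁ := mPeel_sub t L₁ c₁ L₂ [] h₂ (by simp)
  exact (List.perm_of_nodup_nodup_toFinset_eq n₁ n₂
    (Finset.ext fun x => by simp only [List.mem_toFinset]; exact ⟨s₁ x, s₂ x⟩)).length_eq

/- ===== bridging port A to the model ===== -/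

theorem pyGetD_row (s : List String) (i : Int) (h0 : 0 ≤ i) (h1 : i < (s.length : Int)) :
    (PySem.List.pyGetD s i "").toList = mRow s i := by
  have hi : i = ((i.toNat : Nat) : Int) := (Int.toNat_of_nonneg h0).symm
  rw [hi, PySem.List.pyGetD_natCast, mRow, if_pos (by omega)]
  simp
  rw [show max i 0 = i from by omega]

theorem pyGetD_row_out (s : List String) (i : Int) (h1 : (s.length : Int) ≤ i) :
    PySem.List.pyGetD s i "" = "" := by
  simp [PySem.List.pyGetD, PySem.List.pyGet?, PySem.List.pyIdx?]
  split_ifs with h2 h3 h4 <;> simp_all <;> omega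

theorem mRow_out (s : List String) (i : Int) (h : (s.length : Int) ≤ i) : mRow s i = [] := by
  simp [mRow]
  omega

-- the raw cell read of both ports, as a model lookup (for 0 ≤ i, 0 ≤ j)
theorem cellA_getD (s : List String) (i j : Int) (hi : 0 ≤ i) (hj : 0 ≤ j) :
    pvCellA s i j = (mRow s i).getD j.toNat '\x00' := by
  unfold pvCellA
  by_cases hlt : i < (s.length : Int)
  · rw [PySem.Str.pyGet?_eq, show PySem.Chars.pyGet? = (PySem.List.pyGet? (α := Char)) from rfl,
      pyGetD_row s i hi hlt]
    have hjc : j = ((j.toNat : Nat) : Int) := (Int.toNat_of_nonneg hj).symm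
    rw [hjc, PySem.List.pyGet?_natCast]
    simp [List.getD_eq_getElem?_getD]
    rw [show max j 0 = j from by omega]
  · rw [pyGetD_row_out s i (by omega), mRow_out s i (by omega)]
    simp [PySem.Str.pyGet?_eq]
    show (PySem.List.pyGet? ([] : List Char) j).getD '\x00' = '\x00'
    simp [PySem.List.pyGet?, PySem.List.pyIdx?]

theorem relA_refl (t : List String) : RelA t [] t := by
  exact ⟨rfl, fun i => ⟨rfl, fun j _ _ => by simp⟩⟩

theorem cellA_eq (t : List String) (R : List (Int × Int)) (s : List String)
    (h : RelA t R s) (i j : Int) (hi : 0 ≤ i) (hj : 0 ≤ j) :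
    (pvCellA s i j == '@') = mLive t R i j := by
  obtain ⟨hlen, hrow⟩ := h
  obtain ⟨hrl, hch⟩ := hrow i
  rw [cellA_getD s i j hi hj]
  by_cases hjr : j < ((mRow t i).length : Int)
  · by_cases hc' : R.contains (i, j) = true
    · rw [hch j hj hjr, if_pos hc', mLive, hc']
      simp
    · have hc : R.contains (i, j) = false := by simpa using hc'
      have hm : (i, j) ∉ R := by simpa using hc
      rw [hch j hj hjr, if_neg (by simp [hm])]
      simp [mLive, mAt, hj]
      exact fun _ => hm
  · have h1 : (mRow s i)[j.toNat]? = none := by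
      apply List.getElem?_eq_none
      omega
    have h2 : (mRow t i)[j.toNat]? = none := by
      apply List.getElem?_eq_none
      omega
    simp [mLive, mAt, List.getD_eq_getElem?_getD, h1, h2]

theorem offsets_ge (d : Int × Int) (hd : d ∈ pvOffsets) : -1 ≤ d.1 ∧ -1 ≤ d.2 := by
  fin_cases hd <;> simp

theorem boxes_eq (t : List String) (R : List (Int × Int)) (s : List String)
    (h : RelA t R s) (i j : Int) (h1 : 1 ≤ i) (h2 : 1 ≤ j) :
    ([pvCellA s (i-1) (j-1), pvCellA s (i-1) j, pvCellA s (i-1) (j+1),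
      pvCellA s i (j-1),                        pvCellA s i (j+1),
      pvCellA s (i+1) (j-1), pvCellA s (i+1) j, pvCellA s (i+1) (j+1)].foldl
        (fun boxes n => if n = '@' then boxes + 1 else boxes) (0 : Int))
      = (mDeg t R i j : Int) := by
  have hn : [pvCellA s (i-1) (j-1), pvCellA s (i-1) j, pvCellA s (i-1) (j+1),
      pvCellA s i (j-1),                        pvCellA s i (j+1),
      pvCellA s (i+1) (j-1), pvCellA s (i+1) j, pvCellA s (i+1) (j+1)]
      = pvOffsets.map (fun d => pvCellA s (i + d.1) (j + d.2)) := by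
    simp [pvOffsets, sub_eq_add_neg]
  have hf : (fun (boxes : Int) (n : Char) => if n = '@' then boxes + 1 else boxes)
      = (fun (boxes : Int) (n : Char) => if (n == '@') = true then boxes + 1 else boxes) := by
    funext b n
    by_cases hh : n = '@' <;> simp [hh]
  have hcc : List.countP ((fun n => n == '@') ∘ (fun d : Int × Int => pvCellA s (i + d.1) (j + d.2)))
      pvOffsets = List.countP (fun d : Int × Int => mLive t R (i + d.1) (j + d.2)) pvOffsets := by
    refine List.countP_congr (fun d hd => ?_)
    obtain ⟨hd1, hd2⟩ := offsets_ge d hd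
    simp only [Function.comp]
    rw [cellA_eq t R s h (i + d.1) (j + d.2) (by omega) (by omega)]
  rw [hn, hf, PySem.List.foldl_count_if, List.countP_map, hcc]
  simp [mDeg]

theorem find_movable_eq (t : List String) (R : List (Int × Int)) (s : List String)
    (h : RelA t R s) : find_movable s = mMov t R := by
  obtain ⟨hlen, hrow⟩ := h
  unfold find_movable mMov
  rw [hlen]
  rw [PySem.List.foldl_congr_mem _ _
    (fun acc i => acc ++ ((PySem.List.pyRange 1 (((mRow t i).length : Int) - 1) 1).filter
      (fun j => mLive t R i j && decide (mDeg t R i j < 4))).map (fun j => (i, j))) _ ?_]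
  · rw [PySem.List.foldl_append_eq_flatMap]
    simp
  · intro acc i hi
    rw [PySem.List.mem_pyRange_one] at hi
    have hrl : PySem.Str.len (PySem.List.pyGetD s i "") = ((mRow t i).length : Int) := by
      rw [PySem.Str.len_eq, pyGetD_row s i (by omega) (by omega), (hrow i).1]
    rw [hrl]
    rw [PySem.List.foldl_congr_mem _ _
      (fun acc j => if (mLive t R i j && decide (mDeg t R i j < 4)) = true
        then acc ++ [(i, j)] else acc) _ ?_]
    · rw [PySem.List.foldl_append_if]
    · intro acc2 j hj
      rw [PySem.List.mem_pyRange_one] at hj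
      have hc := cellA_eq t R s ⟨hlen, hrow⟩ i j (by omega) (by omega)
      have hb := boxes_eq t R s ⟨hlen, hrow⟩ i j (by omega) (by omega)
      by_cases hl : mLive t R i j = true
      · have hcell : pvCellA s i j = '@' := by
          rw [hl] at hc
          simp at hc
          exact hc
        simp only [hcell, hl, Bool.true_and]
        rw [hb]
        by_cases hdg : mDeg t R i j < 4
        · have hdi : ((mDeg t R i j : Int) < 4) := by exact_mod_cast hdg
          simp [hdi, hdg]
        · have hdi : ¬ ((mDeg t R i j : Int) < 4) := by exact_mod_cast hdg
          simp [hdi, hdg]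
      · have hlf : mLive t R i j = false := by simpa using hl
        have hcell : ¬ pvCellA s i j = '@' := by
          intro he
          rw [he, hlf] at hc
          simp at hc
        simp [hcell, hlf]

theorem mem_mMov (t : List String) (R : List (Int × Int)) (p : Int × Int) :
    p ∈ mMov t R ↔ mCand t p ∧ mLive t R p.1 p.2 = true ∧ mDeg t R p.1 p.2 < 4 := by
  unfold mMov
  simp only [List.mem_flatMap, List.mem_map, List.mem_filter, PySem.List.mem_pyRange_one]
  constructor
  · rintro ⟨i, ⟨hi1, hi2⟩, j, ⟨⟨hj1, hj2⟩, hcond⟩, rfl⟩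
    simp only [Bool.and_eq_true, decide_eq_true_eq] at hcond
    obtain ⟨hlv, hdg⟩ := hcond
    have hat : mAt t i j = true := by
      have h2 := hlv
      simp [mLive] at h2
      exact h2.1
    exact ⟨⟨by omega, by omega, by omega, by omega, hat⟩, hlv, hdg⟩
  · rintro ⟨⟨hc1, hc2, hc3, hc4, hc5⟩, hlv, hdg⟩
    refine ⟨p.1, ⟨by omega, by omega⟩, p.2, ⟨⟨by omega, by omega⟩, by simp [hlv, hdg]⟩, by simp⟩

theorem nodup_flatMap_pairs (f : Int → List Int) :
    ∀ (l : List Int), l.Pairwise (· < ·) → (∀ i ∈ l, (f i).Nodup) →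
      (l.flatMap (fun i => (f i).map (fun j => (i, j)))).Nodup := by
  intro l hp hn
  rw [List.nodup_flatMap]
  constructor
  · intro i hi
    exact ((hn i hi).map (fun a b hab => by simpa using hab))
  · refine hp.imp ?_
    intro a b hab
    simp only [Function.onFun, List.disjoint_left]
    rintro x hx hx'
    simp only [List.mem_map] at hx hx'
    obtain ⟨j, _, rfl⟩ := hx
    obtain ⟨j', _, he⟩ := hx'
    have : b = a := congrArg Prod.fst he
    omega

theorem mMov_nodup (t : List String) (R : List (Int × Int)) : (mMov t R).Nodup := by
  unfold mMov
  exact nodup_flatMap_pairs _ _ (PySem.List.pairwise_lt_pyRange_one ..)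
    (fun i _ => (PySem.List.nodup_pyRange_one ..).filter _)

theorem mMov_nil_closed (t : List String) (R : List (Int × Int))
    (h : mMov t R = []) : mClosed t R := by
  intro p hc hnm
  by_contra hlt
  have hlv : mLive t R p.1 p.2 = true := by
    simp [mLive, hc.2.2.2.2]
    simpa using hnm
  have hp : p ∈ mMov t R := (mem_mMov t R p).2 ⟨hc, hlv, by omega⟩
  rw [h] at hp
  simp at hp

theorem intercalate_nil_flatten (l : List (List Char)) : List.intercalate [] l = l.flatten := by
  induction l with
  | nil => rfl
  | cons x xs ih =>
    cases xs with
    | nil => simp [List.intercalate]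
    | cons y ys =>
      simp [List.intercalate] at ih ⊢
      simpa using ih

theorem set_getD (l : List Char) (n k : Nat) (c d : Char) (h : n < l.length) :
    (l.set n c).getD k d = if k = n then c else l.getD k d := by
  simp only [List.getD_eq_getElem?_getD, List.getElem?_set]
  by_cases hk : k = n
  · subst hk; simp [h]
  · have hnk : n ≠ k := fun he => hk he.symm
    simp [hnk, hk]

theorem patch_row_toList (s : List String) (i j : Int) (h0 : 0 ≤ i) (h1 : i < (s.length : Int))
    (hj0 : 0 ≤ j) (hjl : j < ((mRow s i).length : Int)) :
    (PySem.Str.join "" [PySem.Str.slice (PySem.List.pyGetD s i "") none (some j), ".",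
                        PySem.Str.slice (PySem.List.pyGetD s i "") (some (j + 1)) none]).toList
      = (mRow s i).set j.toNat '.' := by
  rw [PySem.Str.toList_join]
  show PySem.Chars.join "".toList _ = _
  rw [show ("".toList) = ([] : List Char) from rfl,
    show PySem.Chars.join = fun s l => List.intercalate s l from rfl]
  simp only [List.map, intercalate_nil_flatten, List.flatten]
  have hbr : ∀ (str : String) (a b : Option Int),
      (PySem.Str.slice str a b).toList = PySem.List.slice str.toList a b := by
    intro str a b
    simp [PySem.Str.slice]
  have hs1 : (PySem.Str.slice (PySem.List.pyGetD s i "") none (some j)).toList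
      = List.take j.toNat (mRow s i) := by
    rw [hbr, pyGetD_row s i h0 h1]
    exact PySem.List.slice_to _ hj0
  have hs2 : (PySem.Str.slice (PySem.List.pyGetD s i "") (some (j + 1)) none).toList
      = List.drop (j.toNat + 1) (mRow s i) := by
    rw [hbr, pyGetD_row s i h0 h1, PySem.List.slice_from _ (by omega)]
    congr 1
    omega
  rw [hs1, hs2, List.set_eq_take_append_cons_drop]
  rw [if_pos (by omega)]
  simp [show (".".toList) = ['.'] from rfl]

theorem relA_patch (t : List String) (R : List (Int × Int)) (s : List String)
    (h : RelA t R s) (p : Int × Int) (hc : mCand t p) :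
    RelA t (R ++ [p]) (pvPatchRow s p) := by
  obtain ⟨pi, pj⟩ := p
  obtain ⟨hi1, hi2, hj1, hj2, hat⟩ := hc
  obtain ⟨hlen, hrow⟩ := h
  simp only at hi1 hi2 hj1 hj2 hat
  have h0 : (0 : Int) ≤ pi := by omega
  have h1 : pi < (s.length : Int) := by
    rw [hlen]; omega
  have hrl := (hrow pi).1
  have hjlt : pj < ((mRow s pi).length : Int) := by rw [hrl]; omega
  have hnew := patch_row_toList s pi pj h0 h1 (by omega) hjlt
  unfold pvPatchRow
  simp only
  rw [PySem.List.pySetD_of_nonneg _ _ h0]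
  set newRow := PySem.Str.join "" [PySem.Str.slice (PySem.List.pyGetD s pi "") none (some pj), ".",
    PySem.Str.slice (PySem.List.pyGetD s pi "") (some (pj + 1)) none] with hnr
  have hrow' : ∀ i' : Int, mRow (s.set pi.toNat newRow) i'
      = if i' = pi then (mRow s pi).set pj.toNat '.' else mRow s i' := by
    intro i'
    by_cases he : i' = pi
    · rw [he, if_pos rfl]
      unfold mRow
      rw [if_pos (by simp; omega), if_pos (by constructor <;> omega)]
      have : (s.set pi.toNat newRow).getD pi.toNat "" = newRow := by
        simp [List.getD_eq_getElem?_getD, List.getElem?_set]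
        rw [if_pos (by omega)]
        rfl
      rw [this, hnew]
      unfold mRow
      rw [if_pos (by constructor <;> omega)]
    · rw [if_neg he]
      unfold mRow
      by_cases hin : 0 ≤ i' ∧ i' < (s.length : Int)
      · rw [if_pos (by simp; omega), if_pos hin]
        have hne : pi.toNat ≠ i'.toNat := by omega
        simp [List.getD_eq_getElem?_getD, hne]
      · rw [if_neg (by simp at hin ⊢; omega), if_neg hin]
  refine ⟨by simp [hlen], fun i' => ⟨?_, ?_⟩⟩
  · rw [hrow' i']
    by_cases he : i' = pi
    · rw [he, if_pos rfl]
      simp [hrl]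
    · rw [if_neg he]
      exact (hrow i').1
  · intro j' hj'0 hj'lt
    rw [hrow' i']
    by_cases he : i' = pi
    · rw [he] at hj'lt ⊢
      rw [if_pos rfl]
      rw [set_getD _ _ _ _ _ (by omega)]
      by_cases hjj : j' = pj
      · subst hjj
        rw [if_pos rfl, if_pos (by simp)]
      · have hne : (pi, j') ≠ (pi, pj) := by simp [hjj]
        have hcont : (R ++ [(pi, pj)]).contains (pi, j') = R.contains (pi, j') := by
          simp [hne]
        rw [if_neg (by omega), hcont]
        exact (hrow pi).2 j' hj'0 hj'lt
    · rw [if_neg he]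
      have hne : (i', j') ≠ (pi, pj) := by simp [he]
      have hcont : (R ++ [(pi, pj)]).contains (i', j') = R.contains (i', j') := by
        simp [hne]
      rw [hcont]
      exact (hrow i').2 j' hj'0 hj'lt

theorem relA_patch_fold (t : List String) :
    ∀ (M R : List (Int × Int)) (s : List String), RelA t R s → (∀ p ∈ M, mCand t p) →
      RelA t (R ++ M) (M.foldl pvPatchRow s) := by
  intro M
  induction M with
  | nil => intro R s h _; simpa using h
  | cons p M ih =>
    intro R s h hall
    have h' := relA_patch t R s h p (hall p (List.mem_cons_self ..))
    have := ih (R ++ [p]) (pvPatchRow s p) h' (fun q hq => hall q (List.mem_cons_of_mem _ hq))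
    simpa [List.append_assoc] using this

-- #live candidates strictly drops each round
def mLiveCount (t : List String) (R : List (Int × Int)) : Nat :=
  ((mCands t).filter (fun p => !(R.contains p))).length

theorem mem_mCands (t : List String) (p : Int × Int) : p ∈ mCands t ↔ mCand t p := by
  unfold mCands
  simp only [List.mem_flatMap, List.mem_map, List.mem_filter, PySem.List.mem_pyRange_one]
  constructor
  · rintro ⟨i, ⟨hi1, hi2⟩, j, ⟨⟨hj1, hj2⟩, hat⟩, rfl⟩
    exact ⟨by omega, by omega, by omega, by omega, hat⟩
  · rintro ⟨hc1, hc2, hc3, hc4, hc5⟩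
    exact ⟨p.1, ⟨by omega, by omega⟩, p.2, ⟨⟨by omega, by omega⟩, hc5⟩, by simp⟩

theorem countP_lt {α : Type} (l : List α) (p q : α → Bool)
    (himp : ∀ x ∈ l, q x = true → p x = true) :
    ∀ x0 ∈ l, p x0 = true → q x0 = false → l.countP q < l.countP p := by
  induction l with
  | nil => simp
  | cons y ys ih =>
    intro x0 hx0 hp hq
    rw [List.countP_cons, List.countP_cons]
    rcases List.mem_cons.1 hx0 with rfl | hmem
    · simp only [hq, hp]
      simp only [Bool.false_eq_true, if_false, if_true]
      have := List.countP_mono_left (l := ys) (p := q) (q := p)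
        (fun x hx => himp x (List.mem_cons_of_mem _ hx))
      omega
    · have h1 := ih (fun x hx => himp x (List.mem_cons_of_mem _ hx)) x0 hmem hp hq
      have h2 : (if q y then 1 else 0) ≤ (if p y then 1 else 0) := by
        by_cases hqy : q y = true
        · rw [hqy, himp y (List.mem_cons_self ..) hqy]
        · simp [hqy]
      omega

theorem loopA_spec (t : List String) :
    ∀ (fuel : Nat) (R : List (Int × Int)) (s : List String) (total : Int),
      RelA t R s → (∀ p ∈ R, mCand t p) → mLiveCount t R < fuel →
      ∃ L, mPeel t R L ∧ mClosed t (R ++ L) ∧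
        pvLoopA fuel s total = total + L.length := by
  intro fuel
  induction fuel with
  | zero => intro R s total _ _ hf; omega
  | succ fuel ih =>
    intro R s total hrel hcand hf
    have hfm := find_movable_eq t R s hrel
    by_cases hnil : mMov t R = []
    · refine ⟨[], trivial, by simpa using mMov_nil_closed t R hnil, ?_⟩
      simp only [pvLoopA, hfm, hnil]
      simp
    · have hall : ∀ p ∈ mMov t R, mCand t p ∧ p ∉ R ∧ mDeg t R p.1 p.2 < 4 := by
        intro p hp
        obtain ⟨hc, hlv, hdg⟩ := (mem_mMov t R p).1 hp
        refine ⟨hc, ?_, hdg⟩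
        simp [mLive] at hlv
        exact hlv.2
      have hpeelM : mPeel t R (mMov t R) := mPeel_of_forall t (mMov t R) R (mMov_nodup t R) hall
      have hrel' : RelA t (R ++ mMov t R) ((mMov t R).foldl pvPatchRow s) :=
        relA_patch_fold t (mMov t R) R s hrel (fun p hp => (hall p hp).1)
      have hcand' : ∀ p ∈ R ++ mMov t R, mCand t p := by
        intro p hp
        rcases List.mem_append.1 hp with h | h
        · exact hcand p h
        · exact (hall p h).1
      have hlt : mLiveCount t (R ++ mMov t R) < mLiveCount t R := by
        obtain ⟨q, hq⟩ := List.exists_mem_of_ne_nil (mMov t R) hnil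
        unfold mLiveCount
        rw [← List.countP_eq_length_filter, ← List.countP_eq_length_filter]
        refine countP_lt (mCands t) (fun p => !(R.contains p))
          (fun p => !((R ++ mMov t R).contains p)) ?_ q ?_ ?_ ?_
        · intro x _ hx
          simp only [Bool.not_eq_true'] at hx ⊢
          simp only [List.contains_append, Bool.or_eq_false_iff] at hx
          exact hx.1
        · exact (mem_mCands t q).2 (hall q hq).1
        · simp only [Bool.not_eq_true']
          simpa using (hall q hq).2.1
        · have hqm : q ∈ R ++ mMov t R := List.mem_append_right R hq
          simp [hqm]
      obtain ⟨L', hL', hC', hE'⟩ := ih (R ++ mMov t R) ((mMov t R).foldl pvPatchRow s)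
        (total + (mMov t R).length) hrel' hcand' (by omega)
      refine ⟨mMov t R ++ L', mPeel_append t (mMov t R) L' R hpeelM hL',
        by simpa [List.append_assoc] using hC', ?_⟩
      simp only [pvLoopA, hfm]
      rw [if_pos (by simp [List.length_pos_iff, hnil]), hE']
      simp only [List.length_append]
      push_cast
      ring

theorem countP_getD (l : List Char) :
    List.countP (fun k => l.getD k '\x00' == '@') (List.range l.length)
      = List.countP (· == '@') l := by
  induction l with
  | nil => rfl
  | cons x xs ih =>
    simp only [List.length_cons, List.range_succ_eq_map, List.countP_cons, List.countP_map]
    rw [show ((fun k => (x :: xs).getD k '\x00' == '@') ∘ (· + 1))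
        = (fun k => xs.getD k '\x00' == '@') from rfl, ih]
    simp [List.getD]

-- count of candidate js in one row is at most the row's box count
theorem row_cands_le (t : List String) (i : Int) :
    List.countP (fun j => mAt t i j) (PySem.List.pyRange 1 (((mRow t i).length : Int) - 1) 1)
      ≤ (mRow t i).countP (· == '@') := by
  have hfull : List.countP (fun j => mAt t i j) (PySem.List.pyRange 0 ((mRow t i).length : Int) 1)
      = (mRow t i).countP (· == '@') := by
    rw [PySem.List.pyRange_one, List.countP_map]
    have : ((fun j => mAt t i j) ∘ (fun k : Nat => (0 : Int) + k))
        = (fun k : Nat => (mRow t i).getD k '\x00' == '@') := by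
      funext k
      simp [Function.comp, mAt]
    rw [this]
    have hn : ((((mRow t i).length : Int)) - 0).toNat = (mRow t i).length := by omega
    rw [hn, countP_getD]
  by_cases hrl : 2 ≤ (mRow t i).length
  · have hsp1 : PySem.List.pyRange 0 ((mRow t i).length : Int) 1
        = PySem.List.pyRange 0 1 1 ++ PySem.List.pyRange 1 ((mRow t i).length : Int) 1 :=
      PySem.List.pyRange_one_append 0 1 _ (by omega) (by omega)
    have hsp2 : PySem.List.pyRange 1 ((mRow t i).length : Int) 1
        = PySem.List.pyRange 1 (((mRow t i).length : Int) - 1) 1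
          ++ PySem.List.pyRange (((mRow t i).length : Int) - 1) ((mRow t i).length : Int) 1 :=
      PySem.List.pyRange_one_append 1 _ _ (by omega) (by omega)
    rw [hsp1, hsp2] at hfull
    simp only [List.countP_append] at hfull
    omega
  · have : PySem.List.pyRange 1 (((mRow t i).length : Int) - 1) 1 = [] :=
      PySem.List.pyRange_one_eq_nil (by omega)
    simp [this]

theorem mCands_le_atCount (t : List String) : (mCands t).length ≤ pvAtCount t := by
  unfold mCands pvAtCount
  rw [List.length_flatMap]
  by_cases hlen : 2 ≤ t.length
  case neg =>
    have h : PySem.List.pyRange 1 ((t.length : Int) - 1) 1 = [] :=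
      PySem.List.pyRange_one_eq_nil (by omega)
    simp [h]
  case pos =>
    have hrowid : List.map (fun i => (mRow t i).countP (· == '@'))
        (PySem.List.pyRange 0 (t.length : Int) 1)
        = t.map (fun r => r.toList.countP (· == '@')) := by
      have h1 : List.map (fun i => (mRow t i).countP (· == '@'))
          (PySem.List.pyRange 0 (t.length : Int) 1)
          = List.map ((fun r : String => r.toList.countP (· == '@'))
              ∘ (fun i => PySem.List.pyGetD t i ""))
            (PySem.List.pyRange 0 (t.length : Int) 1) := by
        refine List.map_congr_left (fun i hi => ?_)
        rw [PySem.List.mem_pyRange_one] at hi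
        simp only [Function.comp]
        rw [pyGetD_row t i (by omega) (by omega)]
      rw [h1, ← List.map_map]
      congr 1
      have := PySem.List.map_pyGetD_pyRange_zero t ""
      simpa [PySem.List.len_eq] using this
    have hpt : ∀ i ∈ PySem.List.pyRange 1 ((t.length : Int) - 1) 1,
        (((PySem.List.pyRange 1 (((mRow t i).length : Int) - 1) 1).filter
          (fun j => mAt t i j)).map (fun j => ((i, j) : Int × Int))).length
          ≤ (mRow t i).countP (· == '@') := by
      intro i hi
      rw [PySem.List.mem_pyRange_one] at hi
      rw [List.length_map, ← List.countP_eq_length_filter]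
      exact row_cands_le t i
    calc (List.map (fun i => (((PySem.List.pyRange 1 (((mRow t i).length : Int) - 1) 1).filter
            (fun j => mAt t i j)).map (fun j => ((i, j) : Int × Int))).length)
          (PySem.List.pyRange 1 ((t.length : Int) - 1) 1)).sum
        ≤ (List.map (fun i => (mRow t i).countP (· == '@'))
            (PySem.List.pyRange 1 ((t.length : Int) - 1) 1)).sum := by
          apply List.sum_le_sum
          intro i hi
          exact hpt i hi
      _ ≤ (List.map (fun i => (mRow t i).countP (· == '@'))
            (PySem.List.pyRange 0 (t.length : Int) 1)).sum := by
          rw [PySem.List.pyRange_one_append 0 1 (t.length : Int) (by omega) (by omega),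
            PySem.List.pyRange_one_append 1 ((t.length : Int) - 1) (t.length : Int)
              (by omega) (by omega)]
          simp only [List.map_append, List.sum_append]
          omega
      _ = (t.map (fun r => r.toList.countP (· == '@'))).sum := by rw [hrowid]

/- ===== bridging port B to the model ===== -/

theorem pvCandList_eq (t : List String) : pvCandList t = mCands t := by
  unfold pvCandList mCands
  rw [PySem.List.foldl_congr_mem _ _
    (fun acc i => acc ++ ((PySem.List.pyRange 1 (((mRow t i).length : Int) - 1) 1).filter
      (fun j => mAt t i j)).map (fun j => (i, j))) _ ?_]
  · rw [PySem.List.foldl_append_eq_flatMap]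
    simp
  · intro acc i hi
    rw [PySem.List.mem_pyRange_one] at hi
    have hrl : PySem.Str.len (PySem.List.pyGetD t i "") = ((mRow t i).length : Int) := by
      rw [PySem.Str.len_eq, pyGetD_row t i (by omega) (by omega)]
    rw [hrl]
    rw [PySem.List.foldl_congr_mem _ _
      (fun acc j => if mAt t i j = true then acc ++ [(i, j)] else acc) _ ?_]
    · rw [PySem.List.foldl_append_if]
    · intro acc2 j hj
      rw [PySem.List.mem_pyRange_one] at hj
      have hfold : (PySem.Str.pyGet? (PySem.List.pyGetD t i "") j).getD '\x00' = pvCellA t i j := rfl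
      rw [hfold]
      have hc := cellA_eq t [] t (relA_refl t) i j (by omega) (by omega)
      have hml : mLive t [] i j = mAt t i j := by simp [mLive]
      rw [hml] at hc
      by_cases hat : mAt t i j = true
      · have hcell : pvCellA t i j = '@' := by
          rw [hat] at hc
          simp at hc
          exact hc
        simp [hcell, hat]
      · have hatf : mAt t i j = false := by simpa using hat
        have hcell : ¬ pvCellA t i j = '@' := by
          intro he
          rw [he, hatf] at hc
          simp at hc
        simp [hcell, hatf]

theorem pvLiveB_eq (t : List String) (removed : PySem.Set (Int × Int)) (i j : Int) :
    pvLiveB t removed i j = mLive t removed i j := by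
  unfold pvLiveB mLive mAt
  by_cases h1 : 0 ≤ i
  case neg =>
    have : mRow t i = [] := by simp [mRow]; omega
    simp [h1, this]
  case pos =>
  by_cases h2 : i < (t.length : Int)
  case neg =>
    have hr : mRow t i = [] := mRow_out t i (by omega)
    simp [h2, hr]
  case pos =>
  have hrl : PySem.Str.len (PySem.List.pyGetD t i "") = ((mRow t i).length : Int) := by
    rw [PySem.Str.len_eq, pyGetD_row t i h1 h2]
  rw [hrl]
  by_cases h3 : 0 ≤ j
  case neg => simp [h3]
  case pos =>
  by_cases h4 : j < ((mRow t i).length : Int)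
  case neg =>
    have hg : (mRow t i)[j.toNat]? = none := by
      apply List.getElem?_eq_none
      omega
    simp [h4, hg]
  case pos =>
  have hcell : (PySem.Str.pyGet? (PySem.List.pyGetD t i "") j).getD '\x00'
      = (mRow t i).getD j.toNat '\x00' := cellA_getD t i j h1 h3
  rw [hcell]
  simp [h1, h2, h3, h4]

theorem loopB_spec (t : List String) :
    ∀ (fuel : Nat) (removed : PySem.Set (Int × Int)) (stack : List (Int × Int)),
      mPeel t [] removed →
      (∀ p : Int × Int, mCand t p → p ∉ removed → mDeg t removed p.1 p.2 < 4 → p ∈ stack) →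
      stack.length + 9 * ((mCands t).length - removed.length) < fuel →
      ∃ F, mPeel t [] F ∧ mClosed t F ∧
        pvLoopB t fuel removed stack = (F.length : Int) := by
  intro fuel
  induction fuel with
  | zero => intro removed stack _ _ hf; omega
  | succ fuel ih =>
    intro removed stack hpeel hcomp hf
    match stack with
    | [] =>
      refine ⟨removed, hpeel, ?_, by simp [pvLoopB, PySem.Set.len]⟩
      intro p hc hnm
      by_contra hlt
      have := hcomp p hc hnm (by omega)
      simp at this
    | (i, j) :: stack' =>
      have hcand_of : ∀ (hA : (decide (1 ≤ i) && decide (i < (t.length : Int) - 1) && decide (1 ≤ j)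
            && decide (j < PySem.Str.len (PySem.List.pyGetD t i "") - 1)) = true)
          (hB : ((PySem.Str.pyGet? (PySem.List.pyGetD t i "") j).getD '\x00' == '@') = true),
          mCand t (i, j) := by
        intro hA hB
        simp only [Bool.and_eq_true, decide_eq_true_eq] at hA
        obtain ⟨⟨⟨h1, h2⟩, h3⟩, h4⟩ := hA
        have hrl : PySem.Str.len (PySem.List.pyGetD t i "") = ((mRow t i).length : Int) := by
          rw [PySem.Str.len_eq, pyGetD_row t i (by omega) (by omega)]
        rw [hrl] at h4
        refine ⟨h1, h2, h3, h4, ?_⟩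
        have hcg := cellA_getD t i j (by omega) (by omega)
        unfold pvCellA at hcg
        rw [hcg] at hB
        simp only [mAt, Bool.and_eq_true, decide_eq_true_eq]
        exact ⟨by omega, hB⟩
      have hof_cand : mCand t (i, j) →
          ((decide (1 ≤ i) && decide (i < (t.length : Int) - 1) && decide (1 ≤ j)
            && decide (j < PySem.Str.len (PySem.List.pyGetD t i "") - 1)) = true
          ∧ ((PySem.Str.pyGet? (PySem.List.pyGetD t i "") j).getD '\x00' == '@') = true) := by
        rintro ⟨h1, h2, h3, h4, hat⟩
        simp only at h1 h2 h3 h4 hat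
        have hrl : PySem.Str.len (PySem.List.pyGetD t i "") = ((mRow t i).length : Int) := by
          rw [PySem.Str.len_eq, pyGetD_row t i (by omega) (by omega)]
        constructor
        · rw [hrl]
          simp only [Bool.and_eq_true, decide_eq_true_eq]
          exact ⟨⟨⟨h1, h2⟩, h3⟩, h4⟩
        · have hcg := cellA_getD t i j (by omega) (by omega)
          unfold pvCellA at hcg
          rw [hcg]
          simp only [mAt] at hat
          simp only [Bool.and_eq_true] at hat
          exact hat.2
      simp only [pvLoopB]
      by_cases hskip : (PySem.Set.contains removed (i, j)
          || !(decide (1 ≤ i) && decide (i < (t.length : Int) - 1) && decide (1 ≤ j)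
               && decide (j < PySem.Str.len (PySem.List.pyGetD t i "") - 1))
          || !((PySem.Str.pyGet? (PySem.List.pyGetD t i "") j).getD '\x00' == '@')) = true
      case pos =>
        rw [if_pos hskip]
        refine ih removed stack' hpeel ?_ (by simp only [List.length_cons] at hf; omega)
        intro p hc hnm hdeg
        have hp := hcomp p hc hnm hdeg
        rcases List.mem_cons.1 hp with rfl | hp'
        · exfalso
          obtain ⟨hA, hB⟩ := hof_cand hc
          have hcf : PySem.Set.contains removed (i, j) = false := by
            simp only [PySem.Set.contains_eq_listContains]
            simpa using hnm
          rw [hA, hB] at hskip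
          simp at hskip
          exact hnm hskip
        · exact hp'
      case neg =>
        rw [if_neg hskip]
        have hcf : PySem.Set.contains removed (i, j) = false := by
          cases hcase : PySem.Set.contains removed (i, j)
          · rfl
          · exact absurd (by rw [hcase]; rfl) hskip
        have hA : (decide (1 ≤ i) && decide (i < (t.length : Int) - 1) && decide (1 ≤ j)
            && decide (j < PySem.Str.len (PySem.List.pyGetD t i "") - 1)) = true := by
          cases hcase : (decide (1 ≤ i) && decide (i < (t.length : Int) - 1) && decide (1 ≤ j)
            && decide (j < PySem.Str.len (PySem.List.pyGetD t i "") - 1))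
          · exact absurd (by simp only [hcase, Bool.not_false, Bool.or_true, Bool.true_or]) hskip
          · rfl
        have hB : ((PySem.Str.pyGet? (PySem.List.pyGetD t i "") j).getD '\x00' == '@') = true := by
          cases hcase : ((PySem.Str.pyGet? (PySem.List.pyGetD t i "") j).getD '\x00' == '@')
          · exact absurd (by simp only [hcase, Bool.not_false, Bool.or_true]) hskip
          · rfl
        have hcand : mCand t (i, j) := hcand_of hA hB
        have hnm : (i, j) ∉ removed := by
          simp only [PySem.Set.contains_eq_listContains] at hcf
          simpa using hcf
        have hdeg_eq : (pvOffsets.foldl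
            (fun acc d => acc + (if pvLiveB t removed (i + d.1) (j + d.2) then 1 else 0)) (0 : Int))
            = (mDeg t removed i j : Int) := by
          have hfun : (fun (acc : Int) (d : Int × Int) =>
                acc + (if pvLiveB t removed (i + d.1) (j + d.2) then 1 else 0))
              = (fun acc d => if pvLiveB t removed (i + d.1) (j + d.2) = true
                  then acc + 1 else acc) := by
            funext acc d
            by_cases hh : pvLiveB t removed (i + d.1) (j + d.2) = true <;> simp [hh]
          rw [hfun, PySem.List.foldl_count_if]
          have hpf : (fun d : Int × Int => pvLiveB t removed (i + d.1) (j + d.2))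
              = (fun d : Int × Int => mLive t removed (i + d.1) (j + d.2)) :=
            funext (fun d => pvLiveB_eq t removed _ _)
          rw [hpf]
          simp [mDeg]
        rw [hdeg_eq]
        by_cases hlt4 : mDeg t removed i j < 4
        case pos =>
          rw [if_pos (by exact_mod_cast hlt4)]
          have hadd : PySem.Set.add removed (i, j) = removed ++ [(i, j)] :=
            PySem.Set.add_of_not_mem hnm
          rw [hadd]
          have hpeel' : mPeel t [] (removed ++ [(i, j)]) :=
            mPeel_snoc t [] removed (i, j) hpeel hcand (by simpa using hnm) hlt4
          have hprops := mPeel_props t (removed ++ [(i, j)]) [] hpeel'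
          have hsub : (removed ++ [(i, j)]) ⊆ mCands t := by
            intro x hx
            exact (mem_mCands t x).2 (hprops.2 x hx).1
          have hlen_le : (removed ++ [(i, j)]).length ≤ (mCands t).length :=
            (List.subperm_of_subset hprops.1 hsub).length_le
          refine ih (removed ++ [(i, j)])
            ((pvOffsets.map (fun d => (i + d.1, j + d.2))).reverse ++ stack') hpeel' ?_ ?_
          · intro p hc' hnm' hdeg'
            have hpne : p ≠ (i, j) := by
              intro he
              exact hnm' (he ▸ List.mem_append_right _ (by simp))
            by_cases hOld : mDeg t removed p.1 p.2 < 4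
            · have hnmOld : p ∉ removed := fun hin => hnm' (List.mem_append_left _ hin)
              have hp := hcomp p hc' hnmOld hOld
              rcases List.mem_cons.1 hp with rfl | hp'
              · exact absurd rfl hpne
              · exact List.mem_append_right _ hp'
            · have hne : mDeg t (removed ++ [(i, j)]) p.1 p.2 ≠ mDeg t removed p.1 p.2 := by
                omega
              have hmemn : ((i, j) : Int × Int) ∈ pvOffsets.map (fun d => (p.1 + d.1, p.2 + d.2)) := by
                by_contra hno
                exact hne (mDeg_append_singleton t removed (i, j) p.1 p.2 hno)
              have hpn : p ∈ pvOffsets.map (fun d => (i + d.1, j + d.2)) := by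
                have := (nbrs_symm ((i, j) : Int × Int) p).1 hmemn
                simpa using this
              exact List.mem_append_left _ (List.mem_reverse.2 hpn)
          · have h8 : ((pvOffsets.map (fun d => (i + d.1, j + d.2))).reverse).length = 8 := by
              simp [pvOffsets]
            simp only [List.length_append, List.length_cons, List.length_nil, h8] at hf hlen_le ⊢
            omega
        case neg =>
          rw [if_neg (by exact_mod_cast hlt4)]
          refine ih removed stack' hpeel ?_ (by simp only [List.length_cons] at hf; omega)
          intro p hc' hnm' hdeg'
          have hp := hcomp p hc' hnm' hdeg'
          rcases List.mem_cons.1 hp with rfl | hp'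
          · exact absurd hdeg' hlt4
          · exact hp' 

-- ===== VERDICT (by name: the statement is the Claim_ definition above) =====
theorem find_all_movable_spec : Claim_equal_find_all_movable := by
  intro t _ _
  unfold Spec_find_all_movable find_all_movable find_all_movable_alt
  obtain ⟨LA, hLA, hCA, hEA⟩ := loopA_spec t (pvAtCount t + 1) [] t 0 (relA_refl t)
    (by simp) (by
      have h1 : mLiveCount t [] = (mCands t).length := by simp [mLiveCount]
      have h2 := mCands_le_atCount t
      omega)
  obtain ⟨FB, hFB, hCB, hEB⟩ := loopB_spec t (10 * (pvCandList t).length + 1) PySem.Set.empty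
    (pvCandList t) (by trivial)
    (by
      intro p hc _ _
      rw [pvCandList_eq]; exact (mem_mCands t p).2 hc)
    (by rw [pvCandList_eq]; simp [PySem.Set.empty]; omega)
  rw [hEA, hEB]
  have : LA.length = FB.length := mPeel_confluent t LA FB (by simpa using hLA) (by simpa using hCA) hFB hCB
  simp [this]
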